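-- pv_equiv track=rewrite | github.com/Oichkatzelesfrettschen/ancient-compute | backend/tests/unit/test_ancient_algorithms.py | _egyptian_multiply_reference
-- ===== SOURCE A (Python) =====
-- def _egyptian_multiply_reference(a: int, b: int) -> int:
--     """Reference implementation for validation"""
--     if a == 0 or b == 0:
--         return 0
--     if a == 1:
--         return b
--     if b == 1:
--         return a
--
--     result = 0
--     left, right = abs(a), abs(b)
--
--     while right > 0:
--         if right & 1:
--             result += left
--         left <<= 1
--         right >>= 1
--
--     # Handle sign
--     if (a < 0) != (b < 0):
--         result = -result
--
--     return result
-- ===== SOURCE B (Python) =====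
-- def _egyptian_multiply_reference(a: int, b: int) -> int:
--     """Reference implementation for validation"""
--     if a == 0 or b == 0:
--         return 0
--     l, r = abs(a), abs(b)
--     # Classic Egyptian method: doubling table, then greedy decomposition of r
--     # into powers of two from the largest entry down.
--     table = [(1, l)]
--     while table[-1][0] * 2 <= r:
--         p, v = table[-1]
--         table.append((p * 2, v * 2))
--     result, rem = 0, r
--     for p, v in reversed(table):
--         if p <= rem:
--             result += v
--             rem -= p
--     return -result if (a < 0) != (b < 0) else result
-- ===== Notes on version B (the rewrite author's own statement) =====
-- stated objective: alternative
-- what changed: Replaces A's bottom-up bit loop (test right&1, double left, halve right) by the classic table-based Egyptian method: build an explicit doubling table of (power-of-two, doubled-left) pairs, then greedily subtract powers of two from the magnitude scanning the table largest-first; the a==1/b==1 shortcuts are dropped since the table method yields the same values.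
import Mathlib
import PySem

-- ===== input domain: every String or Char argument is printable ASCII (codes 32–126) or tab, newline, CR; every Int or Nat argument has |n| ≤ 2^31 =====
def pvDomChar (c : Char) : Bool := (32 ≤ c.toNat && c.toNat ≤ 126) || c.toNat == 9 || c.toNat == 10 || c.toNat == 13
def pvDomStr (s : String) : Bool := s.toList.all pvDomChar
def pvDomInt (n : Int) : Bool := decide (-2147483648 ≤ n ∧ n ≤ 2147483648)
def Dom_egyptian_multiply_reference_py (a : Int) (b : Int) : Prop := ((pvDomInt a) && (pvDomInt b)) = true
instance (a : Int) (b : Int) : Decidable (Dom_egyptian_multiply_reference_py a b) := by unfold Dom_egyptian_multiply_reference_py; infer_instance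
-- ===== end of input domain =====

-- B replaces A's bottom-up bit loop by the classic table-based Egyptian method
-- (doubling table, then greedy largest-first subtraction); objective: alternative.

-- ===== PORT A =====
-- A's while loop; `right & 1` → PySem.Int.band right 1, `left <<= 1` → left * 2 (exact:
-- Python << 1 doubles every int), `right >>= 1` → PySem.Int.floordiv right 2 (exact: >> 1 floors).
-- fuel only guards totality: right.toNat bounds the number of halving steps, so it never runs out.
def egyLoopA : Nat → Int → Int → Int → Int
  | 0, result, _, _ => result
  | fuel + 1, result, left, right =>
    if right > 0 then
      egyLoopA fuel (if PySem.Int.band right 1 ≠ 0 then result + left else result)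
        (left * 2) (PySem.Int.floordiv right 2)
    else result

def egyptian_multiply_reference_py (a : Int) (b : Int) : Int :=
  if a = 0 ∨ b = 0 then 0
  else if a = 1 then b
  else if b = 1 then a
  else if decide (a < 0) != decide (b < 0) then
    -(egyLoopA b.natAbs 0 (a.natAbs : Int) (b.natAbs : Int))
  else
    egyLoopA b.natAbs 0 (a.natAbs : Int) (b.natAbs : Int)

-- ===== PORT B =====
-- Source B's doubling-table build: `table = [(1,l)]; while table[-1][0]*2 <= r: append (p*2, v*2)`.
-- Rendered as the structurally equal recursion emitting the current pair then continuing while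
-- p*2 ≤ r; fuel b.natAbs only guards totality (the power doubles from 1, so it never runs out).
def egyTableB : Nat → Int → Int → Int → List (Int × Int)
  | 0, p, v, _ => [(p, v)]
  | fuel + 1, p, v, r =>
    (p, v) :: (if p * 2 ≤ r then egyTableB fuel (p * 2) (v * 2) r else [])

-- Source B's `for p, v in reversed(table)` greedy-subtraction body.
def egyStepB (s : Int × Int) (pv : Int × Int) : Int × Int :=
  if pv.1 ≤ s.2 then (s.1 + pv.2, s.2 - pv.1) else s

def egyptian_multiply_reference_py_alt (a : Int) (b : Int) : Int :=
  if a = 0 ∨ b = 0 then 0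
  else
    let result :=
      (((egyTableB b.natAbs 1 (a.natAbs : Int) (b.natAbs : Int)).reverse).foldl
        egyStepB (0, (b.natAbs : Int))).1
    if decide (a < 0) != decide (b < 0) then -result else result

-- ===== PRECONDITION & SPEC =====
def Spec_egyptian_multiply_reference_py (a : Int) (b : Int) (out : Int) : Prop := out = egyptian_multiply_reference_py_alt a b
instance (a : Int) (b : Int) (out : Int) : Decidable (Spec_egyptian_multiply_reference_py a b out) := by unfold Spec_egyptian_multiply_reference_py; infer_instance

-- ===== CLAIM (what is proved, stated in full; the proofs are below) =====
def Claim_equal_egyptian_multiply_reference_py : Prop := ∀ (a : Int) (b : Int), Dom_egyptian_multiply_reference_py a b → Spec_egyptian_multiply_reference_py a b (egyptian_multiply_reference_py a b)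

-- ===== LEMMAS AND PROOFS =====

theorem egyLoopA_eq (fuel : Nat) : ∀ (result left right : Int), 0 ≤ right → right.toNat ≤ fuel →
    egyLoopA fuel result left right = result + left * right := by
  induction fuel with
  | zero =>
    intro result left right h hf
    have hz : right = 0 := by omega
    rw [egyLoopA, hz]; ring
  | succ fuel ih =>
    intro result left right h hf
    rw [egyLoopA]
    by_cases hp : right > 0
    · rw [if_pos hp]
      have h2 : PySem.Int.floordiv right 2 = right / 2 :=
        PySem.Int.floordiv_eq_ediv_of_pos (by omega)
      have hb1 : PySem.Int.band right 1 = right % 2 := by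
        rw [PySem.Int.band_one, PySem.Int.mod_eq_emod_of_pos (by omega)]
      rw [h2, hb1, ih _ _ _ (by omega) (by omega)]
      rcases (by omega : right % 2 = 0 ∨ right % 2 = 1) with h0 | h1
      · rw [if_neg (by omega)]
        have hr : right = 2 * (right / 2) := by omega
        linear_combination -left * hr
      · rw [if_pos (by omega)]
        have hr : right = 2 * (right / 2) + 1 := by omega
        linear_combination -left * hr
    · rw [if_neg hp]
      have hz : right = 0 := by omega
      rw [hz]; ring

-- Greedy largest-first fold over the doubling table: from state (res, rem) with rem ≤ r < p·2^fuel
-- it lands in (res + l·(rem - rem'), rem') with 0 ≤ rem' < p.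
theorem egyTableB_fold (l : Int) (fuel : Nat) : ∀ (p v r res rem : Int),
    v = p * l → 0 < p → 0 ≤ rem → rem ≤ r → r < p * 2 ^ fuel →
    ∃ rem', ((egyTableB fuel p v r).reverse).foldl egyStepB (res, rem)
        = (res + l * (rem - rem'), rem') ∧ 0 ≤ rem' ∧ rem' < p := by
  induction fuel with
  | zero =>
    intro p v r res rem hv hp h0 hr hb
    refine ⟨rem, ?_, h0, by omega⟩
    simp only [egyTableB, List.reverse_singleton, List.foldl, egyStepB]
    rw [if_neg (by omega)]
    simp
  | succ fuel ih =>
    intro p v r res rem hv hp h0 hr hb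
    rw [egyTableB]
    by_cases hc : p * 2 ≤ r
    · rw [if_pos hc]
      have hb' : r < p * 2 * 2 ^ fuel := by
        have : p * 2 ^ (fuel + 1) = p * 2 * 2 ^ fuel := by ring
        omega
      obtain ⟨rem', heq, h0', hlt'⟩ :=
        ih (p * 2) (v * 2) r res rem (by rw [hv]; ring) (by omega) h0 hr hb'
      rw [List.reverse_cons, List.foldl_append, heq]
      simp only [List.foldl, egyStepB]
      by_cases hple : p ≤ rem'
      · rw [if_pos hple]
        refine ⟨rem' - p, by rw [hv]; simp only [Prod.mk.injEq]; exact ⟨by ring, trivial⟩,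
          by omega, by omega⟩
      · rw [if_neg hple]
        exact ⟨rem', rfl, h0', by omega⟩
    · rw [if_neg hc]
      simp only [List.reverse_singleton, List.foldl, egyStepB]
      by_cases hple : p ≤ rem
      · rw [if_pos hple]
        refine ⟨rem - p, by rw [hv]; simp only [Prod.mk.injEq]; exact ⟨by ring, trivial⟩,
          by omega, by omega⟩
      · rw [if_neg hple]
        exact ⟨rem, by simp, h0, by omega⟩
  
theorem signFix (a b : Int) :
    (if decide (a < 0) != decide (b < 0) then -((a.natAbs : Int) * (b.natAbs : Int))
     else (a.natAbs : Int) * (b.natAbs : Int)) = a * b := by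
  by_cases hA : a < 0 <;> by_cases hB : b < 0
  · rw [if_neg (by simp [hA, hB])]
    have ha : (a.natAbs : Int) = -a := by omega
    have hb : (b.natAbs : Int) = -b := by omega
    rw [ha, hb]; ring
  · rw [if_pos (by simp [hA, hB])]
    have ha : (a.natAbs : Int) = -a := by omega
    have hb : (b.natAbs : Int) = b := by omega
    rw [ha, hb]; ring
  · rw [if_pos (by simp [hA, hB])]
    have ha : (a.natAbs : Int) = a := by omega
    have hb : (b.natAbs : Int) = -b := by omega
    rw [ha, hb]; ring
  · rw [if_neg (by simp [hA, hB])]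
    have ha : (a.natAbs : Int) = a := by omega
    have hb : (b.natAbs : Int) = b := by omega
    rw [ha, hb]

theorem egy_A_mul (a b : Int) : egyptian_multiply_reference_py a b = a * b := by
  unfold egyptian_multiply_reference_py
  by_cases hz : a = 0 ∨ b = 0
  · rw [if_pos hz]; rcases hz with h | h <;> simp [h]
  rw [if_neg hz]
  by_cases h1 : a = 1
  · rw [if_pos h1, h1]; ring
  rw [if_neg h1]
  by_cases hb1 : b = 1
  · rw [if_pos hb1, hb1]; ring
  rw [if_neg hb1, egyLoopA_eq _ _ _ _ (Int.natCast_nonneg _) (by omega)]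
  simpa using signFix a b

theorem egy_B_mul (a b : Int) : egyptian_multiply_reference_py_alt a b = a * b := by
  unfold egyptian_multiply_reference_py_alt
  by_cases hz : a = 0 ∨ b = 0
  · rw [if_pos hz]; rcases hz with h | h <;> simp [h]
  rw [if_neg hz]
  have hbne : b ≠ 0 := fun h => hz (Or.inr h)
  have hr1 : (1 : Int) ≤ (b.natAbs : Int) := by omega
  have hpow : (b.natAbs : Int) < 1 * 2 ^ b.natAbs := by
    rw [one_mul]
    exact_mod_cast Nat.lt_two_pow_self (n := b.natAbs)
  obtain ⟨rem', heq, h0', hlt'⟩ :=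
    egyTableB_fold (a.natAbs : Int) b.natAbs 1 (a.natAbs : Int) (b.natAbs : Int) 0
      (b.natAbs : Int) (by ring) one_pos (by omega) (le_refl _) hpow
  have hrem0 : rem' = 0 := by omega
  simp only [heq, hrem0]
  have : (0 : Int) + (a.natAbs : Int) * ((b.natAbs : Int) - 0) =
      (a.natAbs : Int) * (b.natAbs : Int) := by ring
  rw [this]
  exact signFix a b

-- ===== VERDICT (by name: the statement is the Claim_ definition above) =====
theorem egyptian_multiply_reference_py_spec : Claim_equal_egyptian_multiply_reference_py := by
  intro a b _
  unfold Spec_egyptian_multiply_reference_py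
  rw [egy_A_mul, egy_B_mul]
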